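-- pv_equiv track=rewrite | github.com/helengent/Irony-Recognition | AcousticFeatureExtraction/Scripts/preProcess.py | validateTs
-- ===== SOURCE A (Python) =====
-- def validateTs(T, nb_cw=2):
--     newT = T[:]
--     i = 0
--     while i < (len(T)-1):
--         if (T[i] == True) and (T[i+1] == False):
--             n = i
--             while (n < (len(T)-1)) and (T[n+1] == False):
--                 n += 1
--             window = T[i+1:n+1]
--             if len(window) < nb_cw:
--                 for t in range(i+1, n+1):
--                     newT[t] = True
--             i = n
--         else:
--             i+=1
--     return(newT)
-- ===== SOURCE B (Python) =====
-- def validateTs(T, nb_cw=2):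
--     # Two staged passes build run-length arrays, then a pointwise formula decides
--     # each output element: left[i] = length of the False-run ending at i (0 if
--     # T[i] is True), right[i] = length of the False-run starting at i.  An index
--     # is flipped to True iff it sits in a maximal False-run (total length
--     # left[i]+right[i]-1) that is shorter than nb_cw and does not start the list.
--     n = len(T)
--     left = []
--     run = 0
--     for x in T:
--         run = run + 1 if x == False else 0
--         left.append(run)
--     right = []
--     run = 0
--     for x in reversed(T):
--         run = run + 1 if x == False else 0
--         right.append(run)
--     right.reverse()
--     return [True if (left[i] < i + 1 and 0 < left[i] and left[i] + right[i] - 1 < nb_cw)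
--             else T[i] for i in range(n)]
-- ===== Notes on version B (the rewrite author's own statement) =====
-- stated objective: alternative
-- what changed: Replaces A's single in-place scan with index jumps and a nested rescan of each False-run by two staged run-length passes (a forward and a backward pass building left/right run-length arrays) followed by a pointwise closed-form decision per index.
import Mathlib
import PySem

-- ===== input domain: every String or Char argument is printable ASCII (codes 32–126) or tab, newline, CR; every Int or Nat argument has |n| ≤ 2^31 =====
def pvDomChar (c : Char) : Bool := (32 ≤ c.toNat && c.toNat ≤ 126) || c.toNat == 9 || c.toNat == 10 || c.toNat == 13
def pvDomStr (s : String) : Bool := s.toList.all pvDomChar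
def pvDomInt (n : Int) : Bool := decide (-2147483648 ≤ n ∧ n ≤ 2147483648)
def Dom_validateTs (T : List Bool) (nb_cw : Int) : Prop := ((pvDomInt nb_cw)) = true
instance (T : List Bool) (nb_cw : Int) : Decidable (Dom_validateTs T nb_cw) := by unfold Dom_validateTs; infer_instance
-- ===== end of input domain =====

-- B replaces A's fused in-place scan (index jumps + nested rescan of each False-run)
-- by two staged run-length passes (left/right arrays) and a pointwise per-index decision.

-- ===== PORT A =====
theorem pvDecLt {L n : Nat} (h : n < L) : L - (n+1) < L - n :=
  Nat.sub_succ_lt_self L n h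

theorem pvDecSub {L n : Nat} (h : n < L - 1) : L - (n+1) < L - n :=
  pvDecLt (Nat.lt_of_lt_of_le h (Nat.sub_le L 1))

-- inner while: `while (n < (len(T)-1)) and (T[n+1] == False): n += 1`
def pvInnerA (T : List Bool) (n : Nat) : Nat :=
  if h : n < T.length - 1 ∧ T[n+1]? = some false then pvInnerA T (n+1) else n
termination_by T.length - n
decreasing_by exact pvDecSub h.1

theorem pvInnerA_ge (T : List Bool) (n : Nat) : n ≤ pvInnerA T n := by
  unfold pvInnerA
  split
  · exact Nat.le_trans (Nat.le_succ n) (pvInnerA_ge T (n+1))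
  · exact le_refl n
termination_by T.length - n
decreasing_by rename_i h; exact pvDecSub h.1

theorem pvInnerA_step (T : List Bool) (i : Nat) (h1 : i < T.length - 1)
    (h2 : T[i+1]? = some false) : T.length - pvInnerA T i < T.length - i := by
  have hEq : pvInnerA T i = pvInnerA T (i+1) := by
    rw [pvInnerA, dif_pos ⟨h1, h2⟩]
  have hge : i + 1 ≤ pvInnerA T i := hEq ▸ pvInnerA_ge T (i+1)
  exact Nat.sub_lt_sub_left (Nat.lt_of_lt_of_le h1 (Nat.sub_le T.length 1))
    (Nat.lt_of_lt_of_le (Nat.lt_succ_self i) hge)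

theorem pvInnerA_step' (T : List Bool) (i : Nat) (h1 : i < T.length - 1) :
    T.length - (i+1) < T.length - i := pvDecSub h1

-- `for t in range(i+1, n+1): newT[t] = True` (every written index is in range)
def pvFillA (newT : List Bool) (a k : Nat) : List Bool :=
  (List.range' a k).foldl (fun l t => l.set t true) newT

-- outer while of A; newT is the mutated copy, i the loop index
def pvLoopA (T : List Bool) (nb_cw : Int) (newT : List Bool) (i : Nat) : List Bool :=
  if hi : i < T.length - 1 then
    if hc : T[i]? = some true ∧ T[i+1]? = some false then
      let n := pvInnerA T i
      -- window = T[i+1:n+1]; 0 ≤ i+1 ≤ n+1 so the Python slice is take∘drop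
      let window := (T.drop (i+1)).take (n + 1 - (i+1))
      let newT' := if (window.length : Int) < nb_cw then pvFillA newT (i+1) (n - i) else newT
      pvLoopA T nb_cw newT' n
    else
      pvLoopA T nb_cw newT (i+1)
  else newT
termination_by T.length - i
decreasing_by
  · exact pvInnerA_step T i hi hc.2
  · exact pvInnerA_step' T i hi

def validateTs (T : List Bool) (nb_cw : Int) : List Bool :=
  pvLoopA T nb_cw T 0

-- ===== PORT B =====
-- `for x in T: run = run + 1 if x == False else 0; left.append(run)`
def pvScanRuns (T : List Bool) : List Nat :=
  (T.foldl (fun (p : List Nat × Nat) x =>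
     let run := if x = false then p.2 + 1 else 0
     (p.1 ++ [run], run)) ([], 0)).1

def validateTs_alt (T : List Bool) (nb_cw : Int) : List Bool :=
  let n := T.length
  let left := pvScanRuns T
  let right := (pvScanRuns T.reverse).reverse
  (List.range n).map (fun i =>
    if left.getD i 0 < i + 1 ∧ 0 < left.getD i 0 ∧
       ((left.getD i 0 : Int) + (right.getD i 0 : Int) - 1 < nb_cw)
    then true else T.getD i false)

-- ===== PRECONDITION & SPEC =====
def Spec_validateTs (T : List Bool) (nb_cw : Int) (out : List Bool) : Prop := out = validateTs_alt T nb_cw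
instance (T : List Bool) (nb_cw : Int) (out : List Bool) : Decidable (Spec_validateTs T nb_cw out) := by unfold Spec_validateTs; infer_instance

-- ===== CLAIM (what is proved, stated in full; the proofs are below) =====
def Claim_equal_validateTs : Prop := ∀ (T : List Bool) (nb_cw : Int), Dom_validateTs T nb_cw → Spec_validateTs T nb_cw (validateTs T nb_cw)

-- ===== LEMMAS AND PROOFS =====

-- length of the leading run of value v
def pvCountEq (v : Bool) : List Bool → Nat
  | [] => 0
  | x :: t => if x = v then pvCountEq v t + 1 else 0

theorem pvCountEq_le (v : Bool) (l : List Bool) : pvCountEq v l ≤ l.length := by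
  induction l with
  | nil => simp [pvCountEq]
  | cons x t ih => simp only [pvCountEq, List.length_cons]; split <;> omega

theorem pvCountEq_take (v : Bool) (l : List Bool) :
    l.take (pvCountEq v l) = List.replicate (pvCountEq v l) v := by
  induction l with
  | nil => simp [pvCountEq]
  | cons x t ih =>
    by_cases h : x = v
    · simp [pvCountEq, h, List.replicate_succ, ih]
    · simp [pvCountEq, h]

theorem pvCountEq_append (v : Bool) (a b : List Bool) :
    pvCountEq v (a ++ b)
      = if pvCountEq v a = a.length then a.length + pvCountEq v b else pvCountEq v a := by
  induction a with
  | nil => simp [pvCountEq]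
  | cons x t ih =>
    by_cases h : x = v
    · subst h
      simp only [List.cons_append, pvCountEq, if_true, eq_self_iff_true, ih, List.length_cons]
      by_cases h2 : pvCountEq x t = t.length
      · rw [if_pos h2, if_pos (by omega)]; omega
      · rw [if_neg h2, if_neg (by omega)]
    · simp only [List.cons_append, pvCountEq, if_neg h, List.length_cons]
      rw [if_neg (by omega)]

theorem pvCountEq_replicate (v w : Bool) (m : Nat) :
    pvCountEq v (List.replicate m w) = if w = v then m else 0 := by
  induction m with
  | zero => simp [pvCountEq]
  | succ m ih =>
    simp only [List.replicate_succ, pvCountEq, ih]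
    split <;> simp_all

theorem pvCountEq_eq_length (v : Bool) (l : List Bool) (h : pvCountEq v l = l.length) :
    ∀ y ∈ l, y = v := by
  induction l with
  | nil => simp
  | cons x t ih =>
    intro y hy
    simp only [pvCountEq, List.length_cons] at h
    by_cases hx : x = v
    · rw [if_pos hx] at h
      rcases List.mem_cons.1 hy with hEq | hmem
      · exact hEq.trans hx
      · exact ih (by omega) y hmem
    · rw [if_neg hx] at h; omega

theorem pvCountEq_drop_ne (v : Bool) (t : List Bool) :
    t.drop (pvCountEq v t) = [] ∨
      ∃ w r, t.drop (pvCountEq v t) = w :: r ∧ w ≠ v := by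
  induction t with
  | nil => left; simp
  | cons x t ih =>
    by_cases h : x = v
    · simpa [pvCountEq, h] using ih
    · right; exact ⟨x, t, by simp [pvCountEq, h], h⟩

-- the common run-by-run specification of both programs
def pvSB (nb_cw : Int) (prev : Option Bool) : List Bool → List Bool
  | [] => []
  | x :: t =>
    let k := pvCountEq x t + 1
    (if x = false ∧ prev = some true ∧ (k : Int) < nb_cw
     then List.replicate k true else List.replicate k x)
      ++ pvSB nb_cw (some x) (t.drop (pvCountEq x t))
termination_by l => l.length
decreasing_by simp only [List.length_drop, List.length_cons]; omega

-- A's tail behaviour seen from current index i (the list is T.drop i)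
def pvRA (nb_cw : Int) : List Bool → List Bool
  | [] => []
  | [_] => []
  | c :: x :: t =>
    if c = true ∧ x = false then
      let k := pvCountEq false t + 1
      (if (k : Int) < nb_cw then List.replicate k true else List.replicate k false)
        ++ pvRA nb_cw ((x :: t).drop (pvCountEq false t))
    else x :: pvRA nb_cw (x :: t)
termination_by l => l.length
decreasing_by
  · have := pvCountEq_le false t
    simp only [List.length_drop, List.length_cons]; omega
  · simp only [List.length_cons]; omega

theorem pvSB_absorb (nb_cw : Int) (x : Bool) (l : List Bool) :
    pvSB nb_cw (some x) l
      = List.replicate (pvCountEq x l) x ++ pvSB nb_cw (some x) (l.drop (pvCountEq x l)) := by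
  cases l with
  | nil => simp [pvCountEq]
  | cons x' l'' =>
    by_cases hx : x' = x
    · subst hx
      rw [pvSB]
      have hcond : ¬ (x' = false ∧ (some x' : Option Bool) = some true ∧
          ((pvCountEq x' l'' + 1 : Nat) : Int) < nb_cw) := by
        rintro ⟨h1, h2, -⟩; simp at h2; rw [h1] at h2; exact Bool.false_ne_true h2
      simp only [pvCountEq, if_pos rfl, hcond, if_neg hcond, List.replicate_succ,
        List.drop_succ_cons, List.cons_append]
      simp [List.replicate_succ]
    · simp [pvCountEq, hx]

theorem pvInnerA_eq (T : List Bool) (n : Nat) :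
    pvInnerA T n = n + pvCountEq false (T.drop (n+1)) := by
  rw [pvInnerA]
  split
  · rename_i h
    have hn1 : n + 1 < T.length := by omega
    have hd : T.drop (n+1) = false :: T.drop (n+1+1) := by
      rw [List.drop_eq_getElem_cons hn1]
      have := h.2
      rw [List.getElem?_eq_getElem hn1] at this
      simp at this
      rw [this]
    rw [pvInnerA_eq T (n+1), hd]
    simp [pvCountEq]
    omega
  · rename_i h
    by_cases hn1 : n + 1 < T.length
    · have hd : T.drop (n+1) = T[n+1] :: T.drop (n+2) := List.drop_eq_getElem_cons hn1
      have hne : T[n+1] ≠ false := by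
        intro hEq
        exact h ⟨by omega, by rw [List.getElem?_eq_getElem hn1, hEq]⟩
      rw [hd]; simp [pvCountEq, hne]
    · rw [List.drop_eq_nil_of_le (by omega)]; simp [pvCountEq]
termination_by T.length - n
decreasing_by rename_i h; omega

theorem pvFillA_eq (newT : List Bool) (a k : Nat) (h : a + k ≤ newT.length) :
    pvFillA newT a k = newT.take a ++ List.replicate k true ++ newT.drop (a + k) := by
  induction k generalizing newT a with
  | zero => simp [pvFillA]
  | succ k ih =>
    have ha : a < newT.length := by omega
    have step : pvFillA newT a (k+1) = pvFillA (newT.set a true) (a+1) k := by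
      simp [pvFillA, List.range'_succ]
    rw [step, ih (newT.set a true) (a+1) (by simp; omega)]
    rw [List.set_eq_take_cons_drop _ ha]
    rw [List.take_append, List.drop_append]
    simp [List.length_take, Nat.min_eq_left (Nat.le_of_lt ha), List.replicate_succ]
    have h1 : List.take (a+1) (List.take a newT) = List.take a newT := by
      rw [List.take_take]; congr 1; omega
    have h2 : List.drop (a+1+k) (List.take a newT) = [] :=
      List.drop_eq_nil_of_le (by simp [List.length_take]; omega)
    have h3 : a + 1 + k - a = k + 1 := by omega
    rw [h1, h2, h3]
    simp [List.drop_drop]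
    congr 1
    omega

theorem pvCountEq_drop_cons (v : Bool) (l : List Bool) (j : Nat) (h : j < pvCountEq v l) :
    l.drop j = v :: l.drop (j+1) := by
  induction l generalizing j with
  | nil => simp [pvCountEq] at h
  | cons x t ih =>
    by_cases hx : x = v
    · subst hx
      cases j with
      | zero => simp
      | succ j' =>
        simp [pvCountEq] at h
        simpa using ih j' (by omega)
    · simp [pvCountEq, hx] at h

theorem pvRA_SB_aux (nb_cw : Int) : ∀ (N : Nat) (c : Bool) (t : List Bool), t.length ≤ N →
    pvRA nb_cw (c :: t) = pvSB nb_cw (some c) t := by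
  intro N
  induction N with
  | zero =>
    intro c t h
    have ht : t = [] := List.eq_nil_of_length_eq_zero (by omega)
    subst ht
    simp [pvRA, pvSB]
  | succ N ih =>
    intro c t h
    cases t with
    | nil => simp [pvRA, pvSB]
    | cons x t' =>
      by_cases hc : c = true ∧ x = false
      · obtain ⟨hc1, hc2⟩ := hc
        subst hc1; subst hc2
        rw [pvRA]
        have hdrop : (false :: t').drop (pvCountEq false t') = false :: t'.drop (pvCountEq false t') := by
          cases hcnt : pvCountEq false t' with
          | zero => simp
          | succ m =>
            rw [List.drop_succ_cons, ← hcnt]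
            rw [hcnt]
            exact pvCountEq_drop_cons false t' m (by omega)
        rw [if_pos ⟨rfl, rfl⟩, hdrop,
          ih false (t'.drop (pvCountEq false t')) (by simp at h ⊢; omega)]
        conv_rhs => rw [pvSB]
        simp [pvCountEq]
      · have hne : pvRA nb_cw (c :: x :: t') = x :: pvRA nb_cw (x :: t') := by
          rw [pvRA, if_neg hc]
        rw [hne, ih x t' (by simp at h; omega)]
        conv_rhs => rw [pvSB]
        have hcond : ¬ (x = false ∧ (some c : Option Bool) = some true ∧
            ((pvCountEq x t' + 1 : Nat) : Int) < nb_cw) := by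
          rintro ⟨h1, h2, -⟩
          simp at h2
          exact hc ⟨h2, h1⟩
        rw [if_neg hcond]
        simp only [List.replicate_succ, List.cons_append]
        congr 1
        exact pvSB_absorb nb_cw x t'

theorem pvRA_SB (nb_cw : Int) (c : Bool) (t : List Bool) :
    pvRA nb_cw (c :: t) = pvSB nb_cw (some c) t :=
  pvRA_SB_aux nb_cw t.length c t (le_refl _)

theorem pvRA_short (nb_cw : Int) (l : List Bool) (h : l.length ≤ 1) : pvRA nb_cw l = [] := by
  match l, h with
  | [], _ => rw [pvRA]
  | [x], _ => rw [pvRA]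

theorem pvLoopA_eq (T : List Bool) (nb_cw : Int) (newT : List Bool) (i : Nat)
    (hlen : newT.length = T.length) (hdrop : newT.drop (i+1) = T.drop (i+1)) :
    pvLoopA T nb_cw newT i = newT.take (i+1) ++ pvRA nb_cw (T.drop i) := by
  rw [pvLoopA]
  split
  · rename_i hi
    have hiL : i < T.length := by omega
    have hi1 : i + 1 < T.length := by omega
    split
    · rename_i hc
      simp only
      have hTi : T[i] = true := by
        have := hc.1; rw [List.getElem?_eq_getElem hiL] at this; simpa using this
      have hTi1 : T[i+1] = false := by
        have := hc.2; rw [List.getElem?_eq_getElem hi1] at this; simpa using this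
      have hdi : T.drop i = true :: T.drop (i+1) := by
        rw [List.drop_eq_getElem_cons hiL, hTi]
      have hdi1 : T.drop (i+1) = false :: T.drop (i+1+1) := by
        rw [List.drop_eq_getElem_cons hi1, hTi1]
      have hkcons : pvCountEq false (T.drop (i+1))
          = pvCountEq false (T.drop (i+1+1)) + 1 := by
        rw [hdi1]; simp [pvCountEq]
      have hkle : pvCountEq false (T.drop (i+1)) ≤ T.length - (i+1) := by
        have := pvCountEq_le false (T.drop (i+1)); simpa using this
      have hn : pvInnerA T i = i + pvCountEq false (T.drop (i+1)) := pvInnerA_eq T i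
      have hwin : ((T.drop (i+1)).take (pvInnerA T i + 1 - (i+1))).length
          = pvCountEq false (T.drop (i+1)) := by
        rw [hn]
        simp [List.length_take, List.length_drop]
        omega
      have hsub : pvInnerA T i - i = pvCountEq false (T.drop (i+1)) := by omega
      have hcont : (false :: T.drop (i+1+1)).drop (pvCountEq false (T.drop (i+1+1)))
          = T.drop (pvInnerA T i) := by
        rw [← hdi1, hn]
        rw [List.drop_drop]
        congr 1
        omega
      have hRA : pvRA nb_cw (T.drop i)
          = (if ((pvCountEq false (T.drop (i+1)) : Nat) : Int) < nb_cw
             then List.replicate (pvCountEq false (T.drop (i+1))) true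
             else List.replicate (pvCountEq false (T.drop (i+1))) false)
            ++ pvRA nb_cw (T.drop (pvInnerA T i)) := by
        conv_lhs => rw [hdi, hdi1]
        rw [pvRA, if_pos ⟨rfl, rfl⟩]
        dsimp only
        rw [hcont, ← hkcons]
      have hdrop2 : newT.drop (i + 1 + pvCountEq false (T.drop (i+1)))
          = T.drop (i + 1 + pvCountEq false (T.drop (i+1))) := by
        have h3 := congrArg (List.drop (pvCountEq false (T.drop (i+1)))) hdrop
        rw [List.drop_drop, List.drop_drop] at h3
        exact h3
      rw [hwin, hsub]
      split
      · rename_i hfill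
        have hlen1 : i + 1 + pvCountEq false (T.drop (i+1)) ≤ newT.length := by omega
        rw [pvFillA_eq newT (i+1) _ hlen1]
        have hta : (newT.take (i+1)).length = i + 1 := by
          simp [List.length_take]; omega
        have hlen' : (newT.take (i+1) ++ List.replicate (pvCountEq false (T.drop (i+1))) true
            ++ newT.drop (i + 1 + pvCountEq false (T.drop (i+1)))).length = T.length := by
          simp [hta, List.length_replicate]
          omega
        have hdrop' : (newT.take (i+1) ++ List.replicate (pvCountEq false (T.drop (i+1))) true
            ++ newT.drop (i + 1 + pvCountEq false (T.drop (i+1)))).drop (pvInnerA T i + 1)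
            = T.drop (pvInnerA T i + 1) := by
          have h5 : pvInnerA T i + 1 = i + 1 + pvCountEq false (T.drop (i+1)) := by omega
          rw [h5, List.drop_left' (by simp [hta])]
          exact hdrop2
        rw [pvLoopA_eq T nb_cw _ (pvInnerA T i) hlen' hdrop']
        have htk' : (newT.take (i+1) ++ List.replicate (pvCountEq false (T.drop (i+1))) true
            ++ newT.drop (i + 1 + pvCountEq false (T.drop (i+1)))).take (pvInnerA T i + 1)
            = newT.take (i+1) ++ List.replicate (pvCountEq false (T.drop (i+1))) true := by
          have h5 : pvInnerA T i + 1 = i + 1 + pvCountEq false (T.drop (i+1)) := by omega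
          rw [h5, List.take_left' (by simp [hta])]
        rw [htk', hRA, if_pos hfill, List.append_assoc]
      · rename_i hfill
        have hdrop2' : newT.drop (pvInnerA T i + 1) = T.drop (pvInnerA T i + 1) := by
          rw [show pvInnerA T i + 1 = i + 1 + pvCountEq false (T.drop (i+1)) by omega]
          exact hdrop2
        rw [pvLoopA_eq T nb_cw newT (pvInnerA T i) hlen hdrop2']
        have htk : newT.take (pvInnerA T i + 1)
            = newT.take (i+1) ++ List.replicate (pvCountEq false (T.drop (i+1))) false := by
          rw [show pvInnerA T i + 1 = (i+1) + pvCountEq false (T.drop (i+1)) by omega]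
          rw [List.take_add]
          congr 1
          rw [hdrop]
          exact pvCountEq_take false (T.drop (i+1))
        rw [htk, hRA, if_neg hfill, List.append_assoc]
    · rename_i hc
      have hdrop2 : newT.drop (i+1+1) = T.drop (i+1+1) := by
        have h3 := congrArg (List.drop 1) hdrop
        rw [List.drop_drop, List.drop_drop] at h3
        exact h3
      rw [pvLoopA_eq T nb_cw newT (i+1) hlen hdrop2]
      have hdi : T.drop i = T[i] :: T.drop (i+1) := List.drop_eq_getElem_cons hiL
      have hdi1 : T.drop (i+1) = T[i+1] :: T.drop (i+1+1) := List.drop_eq_getElem_cons hi1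
      have hcne : ¬ (T[i] = true ∧ T[i+1] = false) := by
        intro hAnd
        exact hc ⟨by rw [List.getElem?_eq_getElem hiL, hAnd.1],
                  by rw [List.getElem?_eq_getElem hi1, hAnd.2]⟩
      have hRA : pvRA nb_cw (T.drop i) = T[i+1] :: pvRA nb_cw (T.drop (i+1)) := by
        conv_lhs => rw [hdi, hdi1, pvRA, if_neg hcne]
        rw [← hdi1]
      have htk : newT.take (i+1+1) = newT.take (i+1) ++ [T[i+1]] := by
        rw [List.take_add_one]
        congr 1
        have h5 : newT[i+1]? = (newT.drop (i+1))[0]? := by simp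
        rw [h5, hdrop, hdi1]
        simp
      rw [htk, hRA, List.append_assoc]
      simp
  · rename_i hi
    rw [pvRA_short nb_cw _ (by simp [List.length_drop]; omega)]
    rw [List.take_of_length_le (by omega)]
    simp
termination_by T.length - i
decreasing_by
  all_goals omega

-- ===== B-side lemmas =====

-- recursive form of the forward pass, with the running counter as a parameter
def pvLrunList : List Bool → Nat → List Nat
  | [], _ => []
  | x :: t, c =>
    let r := if x = false then c + 1 else 0
    r :: pvLrunList t r

theorem pvLrunList_length (l : List Bool) (c : Nat) : (pvLrunList l c).length = l.length := by
  induction l generalizing c with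
  | nil => rfl
  | cons x t ih => simp [pvLrunList, ih]

theorem pvScanRuns_fold (l : List Bool) (acc : List Nat) (c : Nat) :
    (l.foldl (fun (p : List Nat × Nat) x =>
       let run := if x = false then p.2 + 1 else 0
       (p.1 ++ [run], run)) (acc, c)).1 = acc ++ pvLrunList l c := by
  induction l generalizing acc c with
  | nil => simp [pvLrunList]
  | cons x t ih => simp [pvLrunList, ih, List.append_assoc]

theorem pvScanRuns_eq (T : List Bool) : pvScanRuns T = pvLrunList T 0 := by
  simpa using pvScanRuns_fold T [] 0

theorem pvLrunList_getD (l : List Bool) (c i : Nat) (h : i < l.length) :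
    (pvLrunList l c).getD i 0 =
      pvCountEq false ((l.take (i+1)).reverse) +
        (if pvCountEq false ((l.take (i+1)).reverse) = i + 1 then c else 0) := by
  induction l generalizing c i with
  | nil => simp at h
  | cons x t ih =>
    cases i with
    | zero =>
      simp only [pvLrunList, List.take_succ_cons, List.take_zero, List.reverse_cons,
        List.reverse_nil, List.nil_append, List.getD_cons_zero]
      cases x with
      | false => simp [pvCountEq]; omega
      | true => simp [pvCountEq]
    | succ i =>
      have hit : i < t.length := by simpa using h
      have hlen : ((t.take (i+1)).reverse).length = i + 1 := by
        simp [List.length_take]; omega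
      have hle : pvCountEq false ((t.take (i+1)).reverse) ≤ i + 1 := by
        have := pvCountEq_le false ((t.take (i+1)).reverse); omega
      simp only [pvLrunList, List.getD_cons_succ]
      rw [ih _ _ hit]
      have hpre : ((x :: t).take (i+1+1)).reverse = (t.take (i+1)).reverse ++ [x] := by
        simp
      rw [hpre, pvCountEq_append, hlen]
      cases x with
      | false =>
        by_cases h2 : pvCountEq false ((t.take (i+1)).reverse) = i + 1
        · rw [if_pos h2, if_pos h2]
          simp [pvCountEq]
          omega
        · rw [if_neg h2, if_neg h2, if_neg (by omega)]
      | true =>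
        by_cases h2 : pvCountEq false ((t.take (i+1)).reverse) = i + 1
        · rw [if_pos h2, if_pos h2]
          simp [pvCountEq]
          omega
        · rw [if_neg h2, if_neg h2, if_neg (by omega)]

-- left array value = length of the False-run ending at i
theorem pvLeft_getD (T : List Bool) (i : Nat) (h : i < T.length) :
    (pvScanRuns T).getD i 0 = pvCountEq false ((T.take (i+1)).reverse) := by
  rw [pvScanRuns_eq, pvLrunList_getD T 0 i h]
  split <;> omega

-- right array value = length of the False-run starting at i
theorem pvRight_getD (T : List Bool) (i : Nat) (h : i < T.length) :
    ((pvScanRuns T.reverse).reverse).getD i 0 = pvCountEq false (T.drop i) := by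
  rw [pvScanRuns_eq]
  have hm : (pvLrunList T.reverse 0).length = T.length := by
    rw [pvLrunList_length, List.length_reverse]
  have h1 : i < (pvLrunList T.reverse 0).reverse.length := by simp [hm, h]
  have h2 : T.length - 1 - i < (pvLrunList T.reverse 0).length := by omega
  have h2' : (pvLrunList T.reverse 0).length - 1 - i < (pvLrunList T.reverse 0).length := by
    rw [hm]; omega
  rw [List.getD_eq_getElem _ _ h1, List.getElem_reverse, ← List.getD_eq_getElem _ 0 h2']
  rw [pvLrunList_getD T.reverse 0 _ (by simp only [hm, List.length_reverse]; omega)]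
  rw [show (pvLrunList T.reverse 0).length - 1 - i + 1 = T.length - i from by rw [hm]; omega]
  have h4 : T.reverse.take (T.length - i) = (T.drop i).reverse := by
    rw [List.take_reverse, show T.length - (T.length - i) = i from by omega]
  rw [h4, List.reverse_reverse]
  split <;> omega

theorem pvSB_length (nb_cw : Int) : ∀ (N : Nat) (prev : Option Bool) (l : List Bool),
    l.length ≤ N → (pvSB nb_cw prev l).length = l.length := by
  intro N
  induction N with
  | zero =>
    intro prev l h
    have : l = [] := List.eq_nil_of_length_eq_zero (by omega)
    subst this
    rw [pvSB]
  | succ N ih =>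
    intro prev l h
    cases l with
    | nil => rw [pvSB]
    | cons x t =>
      rw [pvSB]
      have hcnt := pvCountEq_le x t
      have hrec := ih (some x) (t.drop (pvCountEq x t)) (by simp at h ⊢; omega)
      simp only [List.length_append, hrec, List.length_drop, List.length_cons]
      split <;> simp <;> omega

theorem pvSB_getD (nb_cw : Int) : ∀ (N : Nat) (prev : Option Bool) (l : List Bool) (j : Nat),
    l.length ≤ N → j < l.length →
    (pvSB nb_cw prev l).getD j false =
      if 0 < pvCountEq false ((l.take (j+1)).reverse) ∧
         (pvCountEq false ((l.take (j+1)).reverse) < j + 1 ∨ prev = some true) ∧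
         ((pvCountEq false ((l.take (j+1)).reverse) : Int)
            + (pvCountEq false (l.drop j) : Int) - 1 < nb_cw)
      then true else l.getD j false := by
  intro N
  induction N with
  | zero =>
    intro prev l j h hj
    omega
  | succ N ih =>
    intro prev l j h hj
    cases l with
    | nil => simp at hj
    | cons x t =>
      rw [pvSB]
      set cnt := pvCountEq x t with hcntdef
      set k := cnt + 1 with hkdef
      set l' := t.drop cnt with hl'def
      have hcntle : cnt ≤ t.length := pvCountEq_le x t
      have hF1 : (x :: t).take k = List.replicate k x := by
        rw [hkdef, List.take_succ_cons, pvCountEq_take x t, ← List.replicate_succ]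
      have hF3 : x :: t = List.replicate k x ++ l' := by
        conv_lhs => rw [← List.take_append_drop k (x :: t)]
        rw [hF1, hkdef, List.drop_succ_cons]
      have hfirstlen : (if x = false ∧ prev = some true ∧ ((k : Nat) : Int) < nb_cw
          then List.replicate k true else List.replicate k x).length = k := by
        split <;> simp
      by_cases hjk : j < k
      · -- j inside the first run
        have hgetfst : ∀ (m : List Bool),
            ((if x = false ∧ prev = some true ∧ ((k : Nat) : Int) < nb_cw
              then List.replicate k true else List.replicate k x) ++ m).getD j false
            = (if x = false ∧ prev = some true ∧ ((k : Nat) : Int) < nb_cw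
               then true else x) := by
          intro m
          rw [List.getD_append _ _ _ _ (by rw [hfirstlen]; exact hjk)]
          split <;> exact List.getD_replicate _ hjk
        rw [hgetfst]
        have htake : (x :: t).take (j+1) = List.replicate (j+1) x := by
          have : (x :: t).take (j+1) = ((x :: t).take k).take (j+1) := by
            rw [List.take_take, Nat.min_eq_left (by omega)]
          rw [this, hF1, List.take_replicate, Nat.min_eq_left (by omega)]
        have hdropj : (x :: t).drop j = List.replicate (k - j) x ++ l' := by
          conv_lhs => rw [hF3]
          rw [List.drop_append, List.drop_replicate,
            show j - (List.replicate k x).length = 0 from by simp; omega, List.drop_zero]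
        have hget : (x :: t).getD j false = x := by
          conv_lhs => rw [hF3]
          rw [List.getD_append _ _ _ _ (by simp; omega)]
          exact List.getD_replicate _ (by omega)
        cases x with
        | true =>
          rw [hget]
          have hcL : pvCountEq false (((true :: t).take (j+1)).reverse) = 0 := by
            rw [htake, List.reverse_replicate, pvCountEq_replicate, if_neg (by simp)]
          rw [hcL]
          simp
        | false =>
          have hl'0 : pvCountEq false l' = 0 := by
            rcases pvCountEq_drop_ne false t with h0 | ⟨w, r, h0, hw⟩
            · rw [← hcntdef] at h0
              rw [hl'def, h0]
              rfl
            · rw [hl'def, h0, pvCountEq, if_neg hw]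
          have hcL : pvCountEq false (((false :: t).take (j+1)).reverse) = j + 1 := by
            rw [htake, List.reverse_replicate, pvCountEq_replicate, if_pos rfl]
          have hcR : pvCountEq false ((false :: t).drop j) = k - j := by
            rw [hdropj, pvCountEq_append, List.length_replicate, pvCountEq_replicate,
              if_pos rfl, if_pos rfl, hl'0]
            omega
          rw [hget, hcL, hcR]
          have hiff : (false = false ∧ prev = some true ∧ ((k : Nat) : Int) < nb_cw)
              ↔ (0 < j + 1 ∧ (j + 1 < j + 1 ∨ prev = some true) ∧
                 ((j + 1 : Nat) : Int) + ((k - j : Nat) : Int) - 1 < nb_cw) := by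
            constructor
            · rintro ⟨-, h2, h3⟩
              exact ⟨by omega, Or.inr h2, by omega⟩
            · rintro ⟨-, h2, h3⟩
              exact ⟨rfl, h2.resolve_left (by omega), by omega⟩
          rw [if_congr hiff rfl rfl]
      · -- j beyond the first run
        have hlen3 : (x :: t).length = k + l'.length := by
          rw [hF3]; simp
        have hj' : j - k < l'.length := by
          simp only [List.length_cons] at hlen3
          simp only [List.length_cons] at hj
          omega
        have hl'len : l'.length ≤ N := by
          simp only [List.length_cons] at hlen3
          simp only [List.length_cons] at h
          omega
        have hgetapp : ((if x = false ∧ prev = some true ∧ ((k : Nat) : Int) < nb_cw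
            then List.replicate k true else List.replicate k x) ++ pvSB nb_cw (some x) l').getD j false
            = (pvSB nb_cw (some x) l').getD (j - k) false := by
          rw [List.getD_append_right _ _ _ _ (by rw [hfirstlen]; omega), hfirstlen]
        rw [hgetapp, ih (some x) l' (j - k) hl'len hj']
        -- now transfer the pointwise formula from l' back to x :: t
        have hc'le : pvCountEq false ((l'.take (j - k + 1)).reverse) ≤ j - k + 1 := by
          have := pvCountEq_le false ((l'.take (j - k + 1)).reverse)
          simp [List.length_take] at this
          omega
        have hxtrue : pvCountEq false ((l'.take (j - k + 1)).reverse) = j - k + 1 → x = true := by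
          intro hfull
          rcases pvCountEq_drop_ne x t with h0 | ⟨w, r, h0, hw⟩
          · rw [← hcntdef, ← hl'def] at h0
            rw [h0] at hj'; simp at hj'
          · rw [← hcntdef, ← hl'def] at h0
            have hwl : w ∈ (l'.take (j - k + 1)).reverse := by
              rw [h0]
              simp [List.take_succ_cons]
            have := pvCountEq_eq_length false ((l'.take (j - k + 1)).reverse)
              (by rw [hfull]; simp [List.length_take]; omega) w hwl
            rw [this] at hw
            cases x with
            | true => rfl
            | false => exact absurd rfl hw
        have htake : ((x :: t).take (j+1)).reverse
            = (l'.take (j - k + 1)).reverse ++ List.replicate k x := by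
          conv_lhs => rw [hF3]
          rw [List.take_append, List.take_of_length_le (by simp; omega),
            show j + 1 - (List.replicate k x).length = j - k + 1 from by simp; omega]
          rw [List.reverse_append, List.reverse_replicate]
        have hcL : pvCountEq false (((x :: t).take (j+1)).reverse)
            = pvCountEq false ((l'.take (j - k + 1)).reverse) := by
          rw [htake, pvCountEq_append,
            show ((l'.take (j - k + 1)).reverse).length = j - k + 1 from by
              simp [List.length_take]; omega]
          by_cases hfull : pvCountEq false ((l'.take (j - k + 1)).reverse) = j - k + 1
          · rw [if_pos hfull, hxtrue hfull, pvCountEq_replicate, if_neg (by simp), hfull]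
          · rw [if_neg hfull]
        have hdropj : (x :: t).drop j = l'.drop (j - k) := by
          conv_lhs => rw [hF3]
          rw [List.drop_append, List.drop_of_length_le (by simp; omega),
            show j - (List.replicate k x).length = j - k from by simp]
          rfl
        have hget : (x :: t).getD j false = l'.getD (j - k) false := by
          conv_lhs => rw [hF3]
          rw [List.getD_append_right _ _ _ _ (by simp; omega)]
          simp
        rw [hcL, hdropj, hget]
        have hiff : (0 < pvCountEq false ((l'.take (j - k + 1)).reverse) ∧
            (pvCountEq false ((l'.take (j - k + 1)).reverse) < j - k + 1 ∨ (some x : Option Bool) = some true) ∧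
            ((pvCountEq false ((l'.take (j - k + 1)).reverse) : Nat) : Int)
              + ((pvCountEq false (l'.drop (j - k)) : Nat) : Int) - 1 < nb_cw)
            ↔ (0 < pvCountEq false ((l'.take (j - k + 1)).reverse) ∧
            (pvCountEq false ((l'.take (j - k + 1)).reverse) < j + 1 ∨ prev = some true) ∧
            ((pvCountEq false ((l'.take (j - k + 1)).reverse) : Nat) : Int)
              + ((pvCountEq false (l'.drop (j - k)) : Nat) : Int) - 1 < nb_cw) := by
          constructor
          · rintro ⟨h1, -, h3⟩
            exact ⟨h1, Or.inl (by omega), h3⟩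
          · rintro ⟨h1, -, h3⟩
            refine ⟨h1, ?_, h3⟩
            by_cases hfull : pvCountEq false ((l'.take (j - k + 1)).reverse) = j - k + 1
            · exact Or.inr (by rw [hxtrue hfull])
            · exact Or.inl (by omega)
        rw [if_congr hiff rfl rfl]

theorem pvA_eq_SB (T : List Bool) (nb_cw : Int) :
    validateTs T nb_cw = pvSB nb_cw none T := by
  unfold validateTs
  rw [pvLoopA_eq T nb_cw T 0 rfl rfl]
  cases T with
  | nil => simp [pvRA, pvSB]
  | cons c t =>
    simp only [List.drop_zero]
    rw [pvRA_SB]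
    have h1 : pvSB nb_cw none (c :: t)
        = List.replicate (pvCountEq c t + 1) c ++ pvSB nb_cw (some c) (t.drop (pvCountEq c t)) := by
      rw [pvSB]; simp
    rw [h1, pvSB_absorb nb_cw c t]
    simp [List.replicate_succ]

theorem pvB_eq_SB (T : List Bool) (nb_cw : Int) :
    validateTs_alt T nb_cw = pvSB nb_cw none T := by
  have hlenSB : (pvSB nb_cw none T).length = T.length :=
    pvSB_length nb_cw T.length none T (le_refl _)
  apply List.ext_getElem
  · simp [validateTs_alt, hlenSB]
  · intro i h1 h2
    have hiT : i < T.length := by simpa [validateTs_alt] using h1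
    simp only [validateTs_alt, List.getElem_map, List.getElem_range]
    rw [← List.getD_eq_getElem _ false h2]
    rw [pvSB_getD nb_cw T.length none T i (le_refl _) hiT]
    rw [pvLeft_getD T i hiT, pvRight_getD T i hiT]
    have hiff : (pvCountEq false ((T.take (i+1)).reverse) < i + 1 ∧
        0 < pvCountEq false ((T.take (i+1)).reverse) ∧
        ((pvCountEq false ((T.take (i+1)).reverse) : Nat) : Int)
          + ((pvCountEq false (T.drop i) : Nat) : Int) - 1 < nb_cw)
        ↔ (0 < pvCountEq false ((T.take (i+1)).reverse) ∧
        (pvCountEq false ((T.take (i+1)).reverse) < i + 1 ∨ (none : Option Bool) = some true) ∧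
        ((pvCountEq false ((T.take (i+1)).reverse) : Nat) : Int)
          + ((pvCountEq false (T.drop i) : Nat) : Int) - 1 < nb_cw) := by
      constructor
      · rintro ⟨a, b, c⟩
        exact ⟨b, Or.inl a, c⟩
      · rintro ⟨b, a, c⟩
        exact ⟨a.resolve_right (by simp), b, c⟩
    rw [if_congr hiff rfl rfl]

-- ===== VERDICT (by name: the statement is the Claim_ definition above) =====
theorem validateTs_spec : Claim_equal_validateTs := by
  intro T nb_cw _
  unfold Spec_validateTs
  rw [pvA_eq_SB, pvB_eq_SB]
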